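-- pv_equiv track=rewrite | github.com/relastle/vim-nayvy | python3/prussian/importing/utils.py | get_import_block_indices
-- ===== SOURCE A (Python) =====
-- from typing import List, Tuple
--
-- def is_import_related_line(line: str) -> bool:
--     return (
--         line.startswith('import ') or
--         line.startswith('from ')
--     )
--
-- def is_import_unrelated_line(line: str) -> bool:
--     return (
--         not line.startswith('import ') and
--         not line.startswith('from ') and
--         not line.strip().startswith('#') and
--         not line.startswith(' ') and
--         not line.startswith(')')
--     )
--
-- def get_import_block_indices(lines: List[str]) -> List[Tuple[int, int]]:
--     """
--     Returns:
--     [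
--         (1st block's start begin(inclusive), 1st block's end(exclusive)),
--         (2nd block's start begin(inclusive), 2nd block's end(exclusive)),
--         (3rd block's start begin(inclusive), 3rd block's end(exclusive)),
--         ...
--     ]
--     """
--     res = []
--     in_block = False
--     start_index = -1
--     for i, line in enumerate(lines):
--         if (
--             not in_block and
--             is_import_related_line(line)
--         ):
--             # start of import block
--             in_block = True
--             start_index = i
--             continue
--         elif in_block and is_import_unrelated_line(line):
--             # end of import block
--             in_block = False
--             res.append((start_index, i))
--             start_index = -1
--     if start_index >= 0:
--         res.append((start_index, i + 1))
--     return res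
-- ===== SOURCE B (Python) =====
-- from typing import List, Tuple
--
-- def is_import_related_line(line: str) -> bool:
--     return (
--         line.startswith('import ') or
--         line.startswith('from ')
--     )
--
-- def is_import_unrelated_line(line: str) -> bool:
--     return (
--         not line.startswith('import ') and
--         not line.startswith('from ') and
--         not line.strip().startswith('#') and
--         not line.startswith(' ') and
--         not line.startswith(')')
--     )
--
-- def get_import_block_indices(lines: List[str]) -> List[Tuple[int, int]]:
--     """Cursor scan: find each block's start, then walk to its (exclusive) end."""
--     res = []
--     n = len(lines)
--     i = 0
--     while i < n:
--         if is_import_related_line(lines[i]):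
--             j = i + 1
--             while j < n and not is_import_unrelated_line(lines[j]):
--                 j += 1
--             res.append((i, j))
--             i = j
--         else:
--             i += 1
--     return res
-- ===== Notes on version B (the rewrite author's own statement) =====
-- stated objective: alternative
-- what changed: Replaced the in_block/start_index state-machine fold (with a post-loop flush using the leftover loop index) by a nested-loop cursor scan that locates each block's start and then advances an inner cursor to its exclusive end.
import Mathlib
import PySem

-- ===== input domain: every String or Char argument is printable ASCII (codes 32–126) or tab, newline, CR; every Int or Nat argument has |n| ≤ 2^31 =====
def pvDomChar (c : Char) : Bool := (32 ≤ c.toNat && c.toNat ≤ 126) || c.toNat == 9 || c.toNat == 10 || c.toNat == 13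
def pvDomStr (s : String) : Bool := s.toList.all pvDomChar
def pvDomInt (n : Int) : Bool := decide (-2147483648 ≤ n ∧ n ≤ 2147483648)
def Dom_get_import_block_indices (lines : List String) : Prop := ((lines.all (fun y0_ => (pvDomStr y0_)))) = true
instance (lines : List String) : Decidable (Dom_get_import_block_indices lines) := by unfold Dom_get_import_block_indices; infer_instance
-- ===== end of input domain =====

-- B replaces A's in_block/start_index state-machine fold by a nested-loop cursor scan
-- (find each block's start, then walk an inner cursor to its exclusive end); same O(n) cost.


-- ===== PORT A =====
def pyIsImportRelatedLine (line : String) : Bool :=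
  PySem.Str.startswith line "import " || PySem.Str.startswith line "from "

def pyIsImportUnrelatedLine (line : String) : Bool :=
  !PySem.Str.startswith line "import " &&
  !PySem.Str.startswith line "from " &&
  !PySem.Str.startswith (PySem.Str.strip line) "#" &&
  !PySem.Str.startswith line " " &&
  !PySem.Str.startswith line ")"

-- loop body of A: state = (res, in_block, start_index, i); p = (i, line) from enumerate
def gibStepA (st : List (Int × Int) × Bool × Int × Int) (p : Int × String) :
    List (Int × Int) × Bool × Int × Int :=
  if !st.2.1 && pyIsImportRelatedLine p.2 then (st.1, true, p.1, p.1)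
  else if st.2.1 && pyIsImportUnrelatedLine p.2 then
    (st.1 ++ [(st.2.2.1, p.1)], false, -1, p.1)
  else (st.1, st.2.1, st.2.2.1, p.1)

def get_import_block_indices (lines : List String) : List (Int × Int) :=
  let st := (PySem.List.enumerate lines).foldl gibStepA ([], false, -1, 0)
  if st.2.2.1 ≥ 0 then st.1 ++ [(st.2.2.1, st.2.2.2 + 1)] else st.1

-- ===== PORT B =====
-- inner cursor: advance j while j < n and lines[j] is not import-unrelated
-- (the extra Nat argument is a structural fuel bound ≥ n - j, only making the while-loop total)
def gibInnerGo (lines : List String) : Nat → Nat → Nat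
  | 0, j => j
  | fuel + 1, j =>
    if _h : j < lines.length then
      if pyIsImportUnrelatedLine lines[j] then j else gibInnerGo lines fuel (j + 1)
    else j

-- outer cursor: skip lines until a block start, emit (start, end), resume at the end
def gibOuterGo (lines : List String) : Nat → Nat → List (Int × Int)
  | 0, _ => []
  | fuel + 1, i =>
    if _h : i < lines.length then
      if pyIsImportRelatedLine lines[i] then
        ((i : Int), ((gibInnerGo lines fuel (i + 1) : Nat) : Int)) ::
          gibOuterGo lines fuel (gibInnerGo lines fuel (i + 1))
      else gibOuterGo lines fuel (i + 1)
    else []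

def get_import_block_indices_alt (lines : List String) : List (Int × Int) :=
  gibOuterGo lines lines.length 0

-- ===== PRECONDITION & SPEC =====
def Spec_get_import_block_indices (lines : List String) (out : List (Int × Int)) : Prop := out = get_import_block_indices_alt lines
instance (lines : List String) (out : List (Int × Int)) : Decidable (Spec_get_import_block_indices lines out) := by unfold Spec_get_import_block_indices; infer_instance

-- ===== CLAIM (what is proved, stated in full; the proofs are below) =====
def Claim_equal_get_import_block_indices : Prop := ∀ (lines : List String), Dom_get_import_block_indices lines → Spec_get_import_block_indices lines (get_import_block_indices lines)

-- ===== LEMMAS AND PROOFS =====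

-- proof-only restatement of B's cursors by well-founded recursion (no fuel)
def gibInner (lines : List String) (j : Nat) : Nat :=
  if _h : j < lines.length then
    if pyIsImportUnrelatedLine lines[j] then j else gibInner lines (j + 1)
  else j
termination_by lines.length - j

theorem gibInner_ge (lines : List String) (j : Nat) : j ≤ gibInner lines j := by
  fun_induction gibInner lines j <;> omega

def gibOuter (lines : List String) (i : Nat) : List (Int × Int) :=
  if _h : i < lines.length then
    if pyIsImportRelatedLine lines[i] then
      ((i : Int), ((gibInner lines (i + 1) : Nat) : Int)) :: gibOuter lines (gibInner lines (i + 1))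
    else gibOuter lines (i + 1)
  else []
termination_by lines.length - i
decreasing_by
  · have := gibInner_ge lines (i + 1); omega
  · omega

-- the fueled cursors compute the fuel-free ones whenever the fuel bound holds
theorem gibInnerGo_eq (lines : List String) :
    ∀ (f j : Nat), lines.length - j ≤ f → gibInnerGo lines f j = gibInner lines j := by
  intro f
  induction f with
  | zero =>
    intro j hj
    rw [gibInner]; simp [gibInnerGo, Nat.not_lt.mpr (by omega : lines.length ≤ j)]
  | succ f ih =>
    intro j hj
    rw [gibInner, gibInnerGo]
    by_cases hlt : j < lines.length
    · simp only [hlt, dif_pos]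
      by_cases hu : pyIsImportUnrelatedLine lines[j] = true
      · simp [hu]
      · simp only [Bool.not_eq_true] at hu
        simp only [hu, if_neg Bool.false_ne_true]
        rw [ih (j + 1) (by omega), gibInner]
    · simp [hlt]

theorem gibOuterGo_eq (lines : List String) :
    ∀ (f i : Nat), lines.length - i ≤ f → gibOuterGo lines f i = gibOuter lines i := by
  intro f
  induction f with
  | zero =>
    intro i hi
    rw [gibOuter]; simp [gibOuterGo, Nat.not_lt.mpr (by omega : lines.length ≤ i)]
  | succ f ih =>
    intro i hi
    rw [gibOuter, gibOuterGo]
    by_cases hlt : i < lines.length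
    · simp only [hlt, dif_pos]
      by_cases hr : pyIsImportRelatedLine lines[i] = true
      · have hin : gibInnerGo lines f (i + 1) = gibInner lines (i + 1) :=
          gibInnerGo_eq lines f (i + 1) (by omega)
        have hge := gibInner_ge lines (i + 1)
        simp only [hr, hin, ih (gibInner lines (i + 1)) (by omega)]
        simp
      · simp only [Bool.not_eq_true] at hr
        simp only [hr, if_neg Bool.false_ne_true]
        exact ih (i + 1) (by omega)
    · simp [hlt]

-- the post-loop flush of A
def gibFinalize (st : List (Int × Int) × Bool × Int × Int) : List (Int × Int) :=
  if st.2.2.1 ≥ 0 then st.1 ++ [(st.2.2.1, st.2.2.2 + 1)] else st.1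

theorem unrelated_not_related (l : String) :
    pyIsImportUnrelatedLine l = true → pyIsImportRelatedLine l = false := by
  unfold pyIsImportUnrelatedLine pyIsImportRelatedLine
  cases PySem.Str.startswith l "import " <;> cases PySem.Str.startswith l "from " <;> simp_all

-- core invariant: running A's fold from position k agrees with B's cursor scan,
-- both out of a block and inside a block started earlier
theorem gib_main (lines : List String) :
    ∀ (m k : Nat), lines.length - k = m →
      (∀ (res : List (Int × Int)) (i0 : Int),
        gibFinalize ((PySem.List.enumerate (lines.drop k) (k : Int)).foldl gibStepA
            (res, false, -1, i0)) = res ++ gibOuter lines k) ∧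
      (∀ (res : List (Int × Int)) (s : Int), 0 ≤ s → 1 ≤ k →
        gibFinalize ((PySem.List.enumerate (lines.drop k) (k : Int)).foldl gibStepA
            (res, true, s, (k : Int) - 1)) =
          res ++ (s, ((gibInner lines k : Nat) : Int)) :: gibOuter lines (gibInner lines k)) := by
  intro m
  induction m with
  | zero =>
    intro k hk
    have hge : lines.length ≤ k := by omega
    have hdrop : lines.drop k = [] := List.drop_eq_nil_of_le hge
    have houter : gibOuter lines k = [] := by
      rw [gibOuter]; simp [Nat.not_lt.mpr hge]
    have hinner : gibInner lines k = k := by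
      rw [gibInner]; simp [Nat.not_lt.mpr hge]
    constructor
    · intro res i0
      simp [hdrop, gibFinalize, houter]
    · intro res s hs _
      simp [hdrop, gibFinalize, hinner, houter, hs]
  | succ m ih =>
    intro k hk
    have hklt : k < lines.length := by omega
    have hdrop : lines.drop k = lines[k] :: lines.drop (k + 1) :=
      (List.getElem_cons_drop hklt).symm
    have henum : PySem.List.enumerate (lines.drop k) (k : Int) =
        ((k : Int), lines[k]) :: PySem.List.enumerate (lines.drop (k + 1)) ((k : Int) + 1) := by
      rw [hdrop, PySem.List.enumerate_cons]
    have hcast : ((k : Int) + 1) = ((k + 1 : Nat) : Int) := by push_cast; ring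
    obtain ⟨ihOut, ihIn⟩ := ih (k + 1) (by omega)
    constructor
    · intro res i0
      rw [henum, List.foldl_cons]
      by_cases hrel : pyIsImportRelatedLine lines[k] = true
      · have hstep : gibStepA (res, false, -1, i0) ((k : Int), lines[k]) =
            (res, true, (k : Int), (k : Int)) := by
          simp [gibStepA, hrel]
        rw [hstep, hcast]
        have := ihIn res (k : Int) (by positivity) (by omega)
        have harg : ((k + 1 : Nat) : Int) - 1 = (k : Int) := by push_cast; ring
        rw [harg] at this
        rw [this]
        have houter : gibOuter lines k =
            ((k : Int), ((gibInner lines (k + 1) : Nat) : Int)) :: gibOuter lines (gibInner lines (k + 1)) := by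
          rw [gibOuter]; simp [hklt, hrel]
        rw [houter]
      · have hstep : gibStepA (res, false, -1, i0) ((k : Int), lines[k]) =
            (res, false, -1, (k : Int)) := by
          simp [gibStepA, hrel]
        rw [hstep, hcast, ihOut res (k : Int)]
        have houter : gibOuter lines k = gibOuter lines (k + 1) := by
          rw [gibOuter]; simp [hklt, hrel]
        rw [houter]
    · intro res s hs hk1
      rw [henum, List.foldl_cons]
      by_cases hunr : pyIsImportUnrelatedLine lines[k] = true
      · have hrel : pyIsImportRelatedLine lines[k] = false := unrelated_not_related _ hunr
        have hstep : gibStepA (res, true, s, (k : Int) - 1) ((k : Int), lines[k]) =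
            (res ++ [(s, (k : Int))], false, -1, (k : Int)) := by
          simp [gibStepA, hunr]
        rw [hstep, hcast, ihOut (res ++ [(s, (k : Int))]) (k : Int)]
        have hinner : gibInner lines k = k := by
          rw [gibInner]; simp [hklt, hunr]
        have houter : gibOuter lines k = gibOuter lines (k + 1) := by
          rw [gibOuter]; simp [hklt, hrel]
        rw [hinner, houter]
        simp
      · have hunr' : pyIsImportUnrelatedLine lines[k] = false := by
          simpa using hunr
        have hstep : gibStepA (res, true, s, (k : Int) - 1) ((k : Int), lines[k]) =
            (res, true, s, (k : Int)) := by
          simp [gibStepA, hunr']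
        have harg : ((k + 1 : Nat) : Int) - 1 = (k : Int) := by push_cast; ring
        have := ihIn res s hs (by omega)
        rw [harg] at this
        rw [hstep, hcast, this]
        have hinner : gibInner lines k = gibInner lines (k + 1) := by
          rw [gibInner]; simp [hklt, hunr']
        rw [hinner]

-- ===== VERDICT (by name: the statement is the Claim_ definition above) =====
theorem get_import_block_indices_spec : Claim_equal_get_import_block_indices := by
  intro lines _
  show get_import_block_indices lines = get_import_block_indices_alt lines
  have h := (gib_main lines (lines.length - 0) 0 rfl).1 [] 0
  have halt : get_import_block_indices_alt lines = gibOuter lines 0 := by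
    unfold get_import_block_indices_alt
    exact gibOuterGo_eq lines lines.length 0 (by omega)
  rw [halt]
  simpa [get_import_block_indices, gibFinalize] using h
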